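-- pv_equiv track=rewrite | github.com/fmidev/synop-to-bufr | separate_keys_and_values.py | are_all_the_rows_similar
-- ===== SOURCE A (Python) =====
-- def are_all_the_rows_similar(rows):
--     """
--     This function checks if all the rows are the same.
--     """
--     number_of_rows = len(rows)
--     answer = True
--     for i in range(0, number_of_rows - 1):
--         row_a = rows[i]
--         row_b = rows[i+1]
--         if row_a != row_b:
--             answer = False
--
--     return answer
-- ===== SOURCE B (Python) =====
-- def are_all_the_rows_similar(rows):
--     """
--     This function checks if all the rows are the same.
--     """
--     return all(row == rows[0] for row in rows)
-- ===== Notes on version B (the rewrite author's own statement) =====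
-- stated objective: simpler
-- what changed: B compares every row against the fixed first row with all(...) instead of A's indexed loop over adjacent pairs with a sticky answer flag.
import Mathlib
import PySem

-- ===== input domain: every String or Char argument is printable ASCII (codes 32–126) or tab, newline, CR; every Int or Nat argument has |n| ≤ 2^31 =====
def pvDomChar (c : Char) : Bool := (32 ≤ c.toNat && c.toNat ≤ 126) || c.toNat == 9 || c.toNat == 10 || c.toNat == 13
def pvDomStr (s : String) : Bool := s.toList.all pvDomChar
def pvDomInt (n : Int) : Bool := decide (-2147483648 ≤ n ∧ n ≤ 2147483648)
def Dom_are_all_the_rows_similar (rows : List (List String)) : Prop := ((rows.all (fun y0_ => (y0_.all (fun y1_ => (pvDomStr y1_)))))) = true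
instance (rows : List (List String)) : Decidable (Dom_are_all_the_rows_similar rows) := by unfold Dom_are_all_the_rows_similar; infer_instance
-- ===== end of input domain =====

-- B replaces A's indexed loop over adjacent pairs (sticky False flag) by comparing
-- every row against the fixed first row; objective: simpler. Both are total.

-- ===== PORT A =====
-- for i in range(0, number_of_rows - 1): if rows[i] != rows[i+1]: answer = False
def are_all_the_rows_similar (rows : List (List String)) : Bool :=
  let number_of_rows : Int := rows.length
  (PySem.List.pyRange 0 (number_of_rows - 1) 1).foldl
    (fun answer i =>
      let row_a := PySem.List.pyGetD rows i []
      let row_b := PySem.List.pyGetD rows (i + 1) []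
      if row_a ≠ row_b then false else answer)
    true

-- ===== PORT B =====
-- return all(row == rows[0] for row in rows)   (empty generator never indexes rows[0])
def are_all_the_rows_similar_alt (rows : List (List String)) : Bool :=
  match rows with
  | [] => true
  | r :: _ => rows.all (fun row => row == r)

-- ===== PRECONDITION & SPEC =====
def Spec_are_all_the_rows_similar (rows : List (List String)) (out : Bool) : Prop := out = are_all_the_rows_similar_alt rows
instance (rows : List (List String)) (out : Bool) : Decidable (Spec_are_all_the_rows_similar rows out) := by unfold Spec_are_all_the_rows_similar; infer_instance

-- ===== CLAIM (what is proved, stated in full; the proofs are below) =====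
def Claim_equal_are_all_the_rows_similar : Prop := ∀ (rows : List (List String)), Dom_are_all_the_rows_similar rows → Spec_are_all_the_rows_similar rows (are_all_the_rows_similar rows)

-- ===== LEMMAS AND PROOFS =====

-- adjacent-pair chain equality, the value A's loop accumulates
def pvChain : List (List String) → Bool
  | x :: y :: t => (x == y) && pvChain (y :: t)
  | _ => true

-- A's loop body with the two indexed reads done at Nat indices
def pvBodyN (rows : List (List String)) (answer : Bool) (k : Nat) : Bool :=
  if rows.getD k [] ≠ rows.getD (k + 1) [] then false else answer

theorem pvBodyN_shift (x : List String) (rows : List (List String)) (acc : Bool) (k : Nat) :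
    pvBodyN (x :: rows) acc (k + 1) = pvBodyN rows acc k := by
  simp [pvBodyN]

theorem pvLoop_eq_chain : ∀ (rows : List (List String)) (acc : Bool),
    (List.range (rows.length - 1)).foldl (pvBodyN rows) acc = (acc && pvChain rows) := by
  intro rows
  induction rows with
  | nil => intro acc; cases acc <;> rfl
  | cons x t ih =>
    intro acc
    cases t with
    | nil => cases acc <;> rfl
    | cons y t' =>
      have hr : List.range ((x :: y :: t').length - 1)
          = 0 :: (List.range ((y :: t').length - 1)).map (· + 1) := by
        simp [List.range_succ_eq_map]
      rw [hr]
      simp only [List.foldl_cons, List.foldl_map]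
      rw [PySem.List.foldl_congr_mem _ _ (pvBodyN (y :: t')) _
        (fun a k _ => pvBodyN_shift x (y :: t') a k)]
      rw [ih (pvBodyN (x :: y :: t') acc 0)]
      simp only [pvBodyN, pvChain, List.getD_cons_zero, List.getD_cons_succ]
      by_cases hxy : x = y
      · simp [hxy]
      · simp [hxy]

theorem pvChain_eq_all_first : ∀ (r : List String) (t : List (List String)),
    pvChain (r :: t) = (r :: t).all (fun row => row == r) := by
  intro r t
  induction t generalizing r with
  | nil => simp [pvChain]
  | cons y t' ih =>
    by_cases h : r = y
    · subst h
      simp [pvChain, ih r]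
    · have hne : (r == y) = false := by simp [h]
      have hne' : (y == r) = false := by simp [Ne.symm h]
      simp [pvChain, List.all_cons, hne, hne']

theorem pvA_eq_chain (rows : List (List String)) :
    are_all_the_rows_similar rows = pvChain rows := by
  cases rows with
  | nil => rfl
  | cons r t =>
    show (PySem.List.pyRange 0 (((r :: t).length : Int) - 1) 1).foldl
        (fun a i => if PySem.List.pyGetD (r :: t) i [] ≠ PySem.List.pyGetD (r :: t) (i + 1) []
          then false else a) true = pvChain (r :: t)
    have hlen : ((r :: t).length : Int) - 1 = ((t.length : Nat) : Int) := by
      simp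
    rw [hlen, PySem.List.pyRange_zero_natCast, List.foldl_map]
    rw [PySem.List.foldl_congr_mem _ _ (pvBodyN (r :: t)) _ ?_]
    · have h := pvLoop_eq_chain (r :: t) true
      have hlen2 : (r :: t).length - 1 = t.length := by simp
      rw [hlen2] at h
      rw [h, Bool.true_and]
    · intro a k _
      rw [show ((k : Int) + 1) = ((k + 1 : Nat) : Int) from by push_cast; ring,
        PySem.List.pyGetD_natCast, PySem.List.pyGetD_natCast]
      rfl

-- ===== VERDICT (by name: the statement is the Claim_ definition above) =====
theorem are_all_the_rows_similar_spec : Claim_equal_are_all_the_rows_similar := by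
  intro rows _
  unfold Spec_are_all_the_rows_similar
  rw [pvA_eq_chain]
  cases rows with
  | nil => rfl
  | cons r t => exact pvChain_eq_all_first r t
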